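-- pv_equiv track=rewrite | github.com/TheAlgorithms/Python | project_euler/problem_090/sol1.py | split_digits
-- ===== SOURCE A (Python) =====
-- from typing import List, Set
--
-- def split_digits(number: int, num_digits: int) -> List[int]:
--     """
--     Return a list of length num_digits containing the digits of a number.
--     If num_digits is longer than the length of number, the list is filled
--     with zero-padding to the left.
--     >>> split_digits(100,3)
--     [1, 0, 0]
--     >>> split_digits(169,3)
--     [1, 6, 9]
--     >>> split_digits(169,4)
--     [0, 1, 6, 9]
--     >>> split_digits(169,2)
--     Traceback (most recent call last):
--     ValueError: num_digits must be no smaller than the length of number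
--     """
--
--     if 10 ** num_digits <= number:
--         raise ValueError("num_digits must be no smaller than the length of number")
--
--     digits: List[int] = [0] * num_digits
--     for index in range(num_digits):
--         digits[num_digits - 1 - index] = number % 10
--         number //= 10
--
--     return digits
-- ===== SOURCE B (Python) =====
-- def split_digits(number: int, num_digits: int) -> list:
--     if 10 ** num_digits <= number:
--         raise ValueError("num_digits must be no smaller than the length of number")
--     return _digits(number, num_digits) if num_digits > 0 else []
--
-- def _digits(number: int, width: int) -> list:
--     """Digits of number modulo 10**width, zero-padded to width (width >= 1),
--     by divide and conquer on the width: the high width-half digits come from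
--     number // 10**half, the low half digits depend only on number mod 10**half,
--     so number itself can be passed down."""
--     if width == 1:
--         return [number % 10]
--     half = width // 2
--     return _digits(number // 10 ** half, width - half) + _digits(number, half)
-- ===== Notes on version B (the rewrite author's own statement) =====
-- stated objective: alternative
-- what changed: Replaces A's stateful digit peel (mutating number with //= 10 while writing a preallocated list back-to-front) with a divide-and-conquer recursion on the width: split at 10**(width//2), the high digits come from the quotient and the low digits from the same number (only its residue matters), concatenating the two halves.
import Mathlib
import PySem

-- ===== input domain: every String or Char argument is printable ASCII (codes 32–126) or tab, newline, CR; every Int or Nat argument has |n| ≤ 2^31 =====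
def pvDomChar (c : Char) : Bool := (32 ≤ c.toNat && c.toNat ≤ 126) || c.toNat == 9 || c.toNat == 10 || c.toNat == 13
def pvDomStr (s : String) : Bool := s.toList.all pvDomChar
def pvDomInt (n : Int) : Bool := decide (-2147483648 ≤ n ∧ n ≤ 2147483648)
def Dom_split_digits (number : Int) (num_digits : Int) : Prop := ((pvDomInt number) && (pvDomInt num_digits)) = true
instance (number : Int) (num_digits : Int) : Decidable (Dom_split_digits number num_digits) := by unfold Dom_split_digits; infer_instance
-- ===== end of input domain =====

-- B replaces A's stateful peel (number //= 10 writing a preallocated list back-to-front)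
-- by a divide-and-conquer recursion on the width; same cost, different decomposition.

-- ===== PORT A =====
-- digits = [0] * num_digits   (Python: negative count gives []);
-- for index in range(num_digits): digits[nd-1-index] = number % 10; number //= 10.
-- The write index nd-1-index is always a valid nonnegative position, so List.set … .toNat is exact.
def split_digits (number : Int) (num_digits : Int) : List Int :=
  (((PySem.List.pyRange 0 num_digits 1).foldl
      (fun (st : List Int × Int) index =>
        (st.1.set (num_digits - 1 - index).toNat (PySem.Int.mod st.2 10),
         PySem.Int.floordiv st.2 10))
      (List.replicate num_digits.toNat 0, number))).1

-- ===== PORT B =====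
-- _digits(number, width): divide and conquer on the width.  _digits is only ever called with
-- width ≥ 1, so Python's 'width == 1' base test is written 'width ≤ 1' (identical on every
-- reachable call, and it makes termination evident).  'half' is width // 2 ≥ 1 there, so
-- 10 ** half is 10 ^ half.toNat exactly.
def pvDigitsB (number : Int) (width : Int) : List Int :=
  if width ≤ 1 then [PySem.Int.mod number 10]
  else
    pvDigitsB (PySem.Int.floordiv number (10 ^ (PySem.Int.floordiv width 2).toNat))
              (width - PySem.Int.floordiv width 2)
      ++ pvDigitsB number (PySem.Int.floordiv width 2)
termination_by width.toNat
decreasing_by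
  all_goals
    (have h2 : PySem.Int.floordiv width 2 = width / 2 :=
      PySem.Int.floordiv_eq_ediv_of_pos (by norm_num)
     omega)

-- return _digits(number, num_digits) if num_digits > 0 else []
def split_digits_alt (number : Int) (num_digits : Int) : List Int :=
  if num_digits > 0 then pvDigitsB number num_digits else []

-- ===== PRECONDITION & SPEC =====
-- A raises ValueError exactly when 10 ** num_digits <= number: for num_digits ≥ 0 that is
-- number ≥ 10^num_digits; for num_digits < 0 the Python power is a float in (0,1], so the
-- comparison holds exactly for number ≥ 1.  Pre_ excludes exactly those raising inputs.
def Pre_split_digits (number : Int) (num_digits : Int) : Prop :=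
  (0 ≤ num_digits ∧ number < 10 ^ num_digits.toNat) ∨ (num_digits < 0 ∧ number ≤ 0)
instance (number : Int) (num_digits : Int) : Decidable (Pre_split_digits number num_digits) := by
  unfold Pre_split_digits; infer_instance

def pvWitness_split_digits : Int × Int := (169, 3)

def Spec_split_digits (number : Int) (num_digits : Int) (out : List Int) : Prop := out = split_digits_alt number num_digits
instance (number : Int) (num_digits : Int) (out : List Int) : Decidable (Spec_split_digits number num_digits out) := by unfold Spec_split_digits; infer_instance

-- ===== CLAIM (what is proved, stated in full; the proofs are below) =====
def Claim_equal_split_digits : Prop := ∀ (number : Int) (num_digits : Int), Dom_split_digits number num_digits → Pre_split_digits number num_digits → Spec_split_digits number num_digits (split_digits number num_digits)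

-- ===== LEMMAS AND PROOFS =====

-- the digit written at position j of a width-n split
def pvDig (number : Int) (n j : Nat) : Int :=
  PySem.Int.mod (PySem.Int.floordiv number (10 ^ (n - 1 - j))) 10

lemma pvFdivPow (a : Int) (p q : Nat) :
    PySem.Int.floordiv (PySem.Int.floordiv a (10 ^ p)) (10 ^ q) = PySem.Int.floordiv a (10 ^ (p + q)) := by
  rw [PySem.Int.floordiv_eq_ediv_of_pos (a := a) (by positivity),
      PySem.Int.floordiv_eq_ediv_of_pos (by positivity),
      PySem.Int.floordiv_eq_ediv_of_pos (a := a) (by positivity),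
      Int.ediv_ediv_of_nonneg (by positivity : (0:Int) ≤ 10 ^ p), pow_add]

lemma pvFdivOne (a : Int) : PySem.Int.floordiv a 1 = a := by
  rw [PySem.Int.floordiv_eq_ediv_of_pos (by norm_num), Int.ediv_one]

lemma pvRangeSplit {α : Type} (f : Nat → α) (a b : Nat) :
    (List.range (a + b)).map f = (List.range a).map f ++ (List.range b).map (fun k => f (a + k)) := by
  rw [List.range_add, List.map_append, List.map_map]
  rfl

-- the divide-and-conquer recursion computes exactly the per-position digits
lemma pvDigitsB_eq (w : Nat) : ∀ (number : Int), 1 ≤ w →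
    pvDigitsB number (w : Int) = (List.range w).map (pvDig number w) := by
  induction w using Nat.strong_induction_on with
  | _ w ih =>
    intro number hw
    rw [pvDigitsB]
    by_cases h1 : (w : Int) ≤ 1
    · have hw1 : w = 1 := by omega
      subst hw1
      rw [if_pos (by norm_num)]
      simp [pvDig]
    · rw [if_neg h1]
      have hw2 : 2 ≤ w := by omega
      have hhalf : PySem.Int.floordiv (w : Int) 2 = ((w / 2 : Nat) : Int) := by
        exact_mod_cast PySem.Int.floordiv_natCast w 2
      have hsub : (w : Int) - ((w / 2 : Nat) : Int) = ((w - w / 2 : Nat) : Int) := by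
        push_cast; omega
      rw [hhalf, hsub, Int.toNat_natCast,
          ih (w - w / 2) (by omega) _ (by omega),
          ih (w / 2) (by omega) _ (by omega)]
      have hsplit : (List.range w).map (pvDig number w)
          = (List.range (w - w / 2)).map (pvDig number w)
            ++ (List.range (w / 2)).map (fun k => pvDig number w (w - w / 2 + k)) := by
        have h := pvRangeSplit (pvDig number w) (w - w / 2) (w / 2)
        rwa [Nat.sub_add_cancel (Nat.div_le_self w 2)] at h
      rw [hsplit]
      congr 1
      · apply List.map_congr_left
        intro j hj
        simp only [List.mem_range] at hj
        unfold pvDig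
        rw [pvFdivPow]
        have he : w / 2 + (w - w / 2 - 1 - j) = w - 1 - j := by omega
        rw [he]
      · apply List.map_congr_left
        intro k hk
        simp only [List.mem_range] at hk
        unfold pvDig
        have he : w - 1 - (w - w / 2 + k) = w / 2 - 1 - k := by omega
        rw [he]

lemma pvLoopA (number : Int) (n k : Nat) (hk : k ≤ n) :
    (PySem.List.pyRange 0 (k : Int) 1).foldl
      (fun (st : List Int × Int) index =>
        (st.1.set ((n : Int) - 1 - index).toNat (PySem.Int.mod st.2 10),
         PySem.Int.floordiv st.2 10))
      (List.replicate n 0, number)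
    = ((List.range n).map (fun j => if n - k ≤ j then pvDig number n j else 0),
       PySem.Int.floordiv number (10 ^ k)) := by
  induction k with
  | zero =>
    rw [show ((0 : Nat) : Int) = 0 by norm_num, PySem.List.pyRange_one_eq_nil (by norm_num)]
    simp only [List.foldl_nil]
    refine Prod.ext ?_ ?_
    · apply List.ext_getElem (by simp)
      intro i h1 h2
      simp only [List.length_replicate] at h1
      simp only [List.getElem_replicate, List.getElem_map, List.getElem_range]
      rw [if_neg (by omega)]
    · simp only
      rw [pow_zero, pvFdivOne]
  | succ k ih =>
    have hk' : k ≤ n := by omega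
    rw [show ((k + 1 : Nat) : Int) = (k : Int) + 1 by push_cast; ring,
        PySem.List.pyRange_one_succ_right (by positivity), List.foldl_append, ih hk',
        List.foldl_cons, List.foldl_nil]
    refine Prod.ext ?_ ?_
    · simp only
      have hidx : (((n : Int) - 1 - (k : Int)).toNat) = n - 1 - k := by omega
      rw [hidx]
      apply List.ext_getElem (by simp)
      intro i h1 h2
      simp only [List.length_set, List.length_map, List.length_range] at h1 h2
      simp only [List.getElem_set, List.getElem_map, List.getElem_range]
      by_cases hi : n - 1 - k = i
      · subst hi
        rw [if_pos rfl, if_pos (by omega)]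
        unfold pvDig
        have : n - 1 - (n - 1 - k) = k := by omega
        rw [this]
      · rw [if_neg hi]
        by_cases h2' : n - (k + 1) ≤ i
        · rw [if_pos h2', if_pos (by omega)]
        · rw [if_neg h2', if_neg (by omega)]
    · exact (pvFdivPow number k 1).trans rfl

lemma pvMain (number : Int) (num_digits : Int) :
    split_digits number num_digits = split_digits_alt number num_digits := by
  by_cases h : num_digits ≤ 0
  · unfold split_digits split_digits_alt
    rw [PySem.List.pyRange_one_eq_nil h, if_neg (by omega)]
    simp
    omega
  · push Not at h
    obtain ⟨n, rfl⟩ : ∃ n : Nat, num_digits = (n : Int) := ⟨num_digits.toNat, by omega⟩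
    unfold split_digits split_digits_alt
    rw [Int.toNat_natCast, pvLoopA number n n le_rfl, if_pos h,
        pvDigitsB_eq n number (by omega)]
    simp only
    apply List.map_congr_left
    intro j hj
    rw [if_pos (by omega)]

-- ===== VERDICT (by name: the statement is the Claim_ definition above) =====
theorem split_digits_spec : Claim_equal_split_digits := by
  intro number num_digits _ _
  exact pvMain number num_digits
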